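-- pv_equiv track=rewrite | github.com/sefabzn/MyPythonProjects | BoardGameProject/BoardGame.py | generate
-- ===== SOURCE A (Python) =====
-- def generate(row,column):
--
--     MainBoard=[]
--     a=-1
--     for i in range(row):
--         board_row=[]
--         for j in range(column):
--             a+=1
--             board_row.append(a)
--         MainBoard.append(board_row)
--     return MainBoard
-- ===== SOURCE B (Python) =====
-- def generate(row, column):
--     flat = range(row * column)
--     return [list(flat[i * column:(i + 1) * column]) for i in range(row)]
-- ===== Notes on version B (the rewrite author's own statement) =====
-- stated objective: alternative
-- what changed: B generates the whole flat sequence list(range(row*column)) once and reshapes it into rows by slicing, instead of A's nested loops with a running counter and per-cell appends.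
import Mathlib
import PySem

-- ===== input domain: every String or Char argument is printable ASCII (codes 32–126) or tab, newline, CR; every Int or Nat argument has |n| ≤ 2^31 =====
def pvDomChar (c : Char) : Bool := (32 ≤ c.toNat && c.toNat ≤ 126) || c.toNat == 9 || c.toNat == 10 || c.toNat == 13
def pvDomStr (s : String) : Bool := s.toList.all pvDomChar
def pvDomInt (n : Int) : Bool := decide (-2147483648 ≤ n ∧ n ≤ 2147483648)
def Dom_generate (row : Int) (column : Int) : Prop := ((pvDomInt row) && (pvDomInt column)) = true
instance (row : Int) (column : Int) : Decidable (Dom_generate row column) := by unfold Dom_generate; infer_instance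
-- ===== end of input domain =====

-- B builds the flat sequence range(row*column) once and reshapes it by slicing,
-- replacing A's running counter with nested appends (objective: alternative decomposition).

-- ===== PORT A =====
-- A: nested loops, counter a starts at -1, each cell appends a+1.
def generate (row : Int) (column : Int) : List (List Int) :=
  ((PySem.List.pyRange 0 row 1).foldl
    (fun (st : Int × List (List Int)) (_ : Int) =>
      let inner := (PySem.List.pyRange 0 column 1).foldl
        (fun (st2 : Int × List Int) (_ : Int) => (st2.1 + 1, st2.2 ++ [st2.1 + 1]))
        (st.1, [])
      (inner.1, st.2 ++ [inner.2]))
    (-1, [])).2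

-- ===== PORT B =====
-- B: flat = range(row*column); [list(flat[i*column:(i+1)*column]) for i in range(row)]
-- (the range is ported as the pyRange list; slicing it is PySem.List.slice)
def generate_alt (row : Int) (column : Int) : List (List Int) :=
  let flat := PySem.List.pyRange 0 (row * column) 1
  (PySem.List.pyRange 0 row 1).map
    (fun i => PySem.List.slice flat (some (i * column)) (some ((i + 1) * column)))

-- ===== PRECONDITION & SPEC =====
def Spec_generate (row : Int) (column : Int) (out : List (List Int)) : Prop := out = generate_alt row column
instance (row : Int) (column : Int) (out : List (List Int)) : Decidable (Spec_generate row column out) := by unfold Spec_generate; infer_instance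

-- ===== CLAIM (what is proved, stated in full; the proofs are below) =====
def Claim_equal_generate : Prop := ∀ (row : Int) (column : Int), Dom_generate row column → Spec_generate row column (generate row column)

-- ===== LEMMAS AND PROOFS =====

-- closed form both ports are reduced to
def pvGrid (n c : Nat) : List (List Int) :=
  (List.range n).map (fun i => (List.range c).map (fun j => ((i * c + j : Nat) : Int)))

theorem pv_pyRange_eq (b : Int) :
    PySem.List.pyRange 0 b 1 = (List.range b.toNat).map (fun k => ((k : Nat) : Int)) := by
  by_cases hb : 0 ≤ b
  · obtain ⟨n, rfl⟩ := Int.eq_ofNat_of_zero_le hb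
    simpa using PySem.List.pyRange_zero_natCast n
  · have h1 : PySem.List.pyRange 0 b 1 = [] := by simp [PySem.List.pyRange]; omega
    have h2 : b.toNat = 0 := by omega
    simp [h1, h2]

theorem pv_inner (xs : List Int) :
    ∀ (a : Int) (l : List Int),
    xs.foldl (fun (st2 : Int × List Int) (_ : Int) => (st2.1 + 1, st2.2 ++ [st2.1 + 1])) (a, l)
      = (a + xs.length, l ++ (List.range xs.length).map (fun j : Nat => a + 1 + (j : Int))) := by
  induction xs with
  | nil => intro a l; simp
  | cons x xs ih =>
    intro a l
    rw [List.foldl_cons, ih]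
    refine Prod.ext ?_ ?_
    · simp; ring
    · show (l ++ [a + 1]) ++ _ = l ++ _
      rw [List.length_cons, List.range_succ_eq_map, List.append_assoc]
      congr 1
      simp only [List.map_cons, List.map_map, Nat.cast_zero, List.singleton_append]
      congr 1
      · ring
      · refine List.map_congr_left ?_
        intro j _
        simp only [Function.comp, Nat.succ_eq_add_one]
        push_cast
        ring

theorem pv_A_closed (column : Int) (n : Nat) :
    ((List.range n).map (fun k => ((k : Nat) : Int))).foldl
      (fun (st : Int × List (List Int)) (_ : Int) =>
        let inner := (PySem.List.pyRange 0 column 1).foldl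
          (fun (st2 : Int × List Int) (_ : Int) => (st2.1 + 1, st2.2 ++ [st2.1 + 1]))
          (st.1, [])
        (inner.1, st.2 ++ [inner.2]))
      (-1, [])
      = (((n * column.toNat : Nat) : Int) - 1, pvGrid n column.toNat) := by
  induction n with
  | zero => simp [pvGrid]
  | succ n ih =>
    rw [List.range_succ, List.map_append, List.foldl_append, ih]
    simp only [List.map_cons, List.map_nil, List.foldl_cons, List.foldl_nil]
    rw [pv_inner]
    have hl : (PySem.List.pyRange 0 column 1).length = column.toNat := by
      rw [pv_pyRange_eq]; simp
    refine Prod.ext ?_ ?_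
    · simp only [hl]; push_cast; ring
    · show pvGrid n column.toNat ++ [_] = pvGrid (n + 1) column.toNat
      simp only [pvGrid, List.range_succ, List.map_append, List.map_cons, List.map_nil]
      congr 2
      simp only [hl, List.nil_append]
      refine List.map_congr_left ?_
      intro j _
      push_cast
      ring

theorem pv_A_eq (row column : Int) : generate row column = pvGrid row.toNat column.toNat := by
  unfold generate
  rw [pv_pyRange_eq row, pv_A_closed]

theorem pv_B_eq (row column : Int) : generate_alt row column = pvGrid row.toNat column.toNat := by
  unfold generate_alt pvGrid
  rw [pv_pyRange_eq row, List.map_map]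
  refine List.map_congr_left ?_
  intro i hi
  have hin : i < row.toNat := List.mem_range.mp hi
  have hrow : 0 < row := by omega
  simp only [Function.comp]
  by_cases hc : column ≤ 0
  · -- column ≤ 0: flat is empty (row*column ≤ 0) and every row of A is empty
    have hflat : PySem.List.pyRange 0 (row * column) 1 = [] := by
      have : row * column ≤ 0 := mul_nonpos_of_nonneg_of_nonpos (le_of_lt hrow) hc
      simp [PySem.List.pyRange]; omega
    have hc0 : column.toNat = 0 := by omega
    simp [hflat, hc0, PySem.List.slice]
  · -- column > 0
    replace hc : 0 < column := by omega
    obtain ⟨c, rfl⟩ : ∃ c : Nat, column = (c : Int) := ⟨column.toNat, by omega⟩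
    have ha : ((i : Int) * (c : Int)) = ((i * c : Nat) : Int) := by push_cast; ring
    have hb : (((i : Int) + 1) * (c : Int)) = (((i + 1) * c : Nat) : Int) := by push_cast; ring
    rw [ha, hb, PySem.List.slice_natCast]
    have hrc : (row * (c : Int)).toNat = row.toNat * c := by
      obtain ⟨m, rfl⟩ := Int.eq_ofNat_of_zero_le (le_of_lt hrow)
      rw [← Nat.cast_mul, Int.toNat_natCast, Int.toNat_natCast]
    rw [pv_pyRange_eq, hrc, ← List.map_drop, ← List.map_take,
        List.range_eq_range', List.drop_range']
    simp only [Nat.zero_add, Nat.mul_one, Int.toNat_natCast]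
    have htake : ((i + 1) * c - i * c) ≤ row.toNat * c - i * c := by
      have : (i + 1) * c ≤ row.toNat * c := Nat.mul_le_mul_right c hin
      omega
    rw [List.take_range'_of_length_ge htake]
    have hcnt : (i + 1) * c - i * c = c := by
      rw [Nat.succ_mul]; omega
    rw [hcnt, List.range'_eq_map_range, List.map_map]
    refine List.map_congr_left ?_
    intro j _
    simp

-- ===== VERDICT (by name: the statement is the Claim_ definition above) =====
theorem generate_spec : Claim_equal_generate := by
  intro row column _
  show generate row column = generate_alt row column
  rw [pv_A_eq, pv_B_eq]
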